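-- pv_equiv track=rewrite | github.com/white1033/project_euler | src/euler/problems/p0065_convergents_of_e/solution.py | solve
-- ===== SOURCE A (Python) =====
-- def solve(n: int = 100) -> int:
--     """
--     Find the sum of digits in the numerator of the n-th convergent of the continued fraction for e.
--     """
--     # 1. Generate the sequence of coefficients a_0, a_1, ..., a_{n-1}
--     # a_0 = 2
--     # For k >= 1:
--     #   if k % 3 == 2: a_k = 2 * (k + 1) // 3
--     #   else:          a_k = 1
--
--     # We need the n-th convergent.
--     # Convergents are h_k / k_k
--     # h_0 = a_0
--     # h_1 = a_1 * a_0 + 1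
--     # h_k = a_k * h_{k-1} + h_{k-2}
--
--     # We only need to track the numerators h_{k}, h_{k-1}, h_{k-2}
--
--     # Initialize recurrence state
--     # h_{-2} = 0, h_{-1} = 1
--     # h_k = a_k * h_{k-1} + h_{k-2}
--
--     h_minus_2 = 0
--     h_minus_1 = 1
--
--     current_h = 0
--
--     for k in range(n):
--         a_k = 2 if k == 0 else (2 * (k + 1) // 3 if k % 3 == 2 else 1)
--
--         current_h = a_k * h_minus_1 + h_minus_2
--
--         # Shift for next iteration
--         h_minus_2 = h_minus_1
--         h_minus_1 = current_h
--
--     # After n iterations (k from 0 to n-1), current_h is h_{n-1}, which is the n-th convergent.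
--
--     # Sum of digits
--     return sum(int(d) for d in str(current_h))
-- ===== SOURCE B (Python) =====
-- def solve(n: int = 100) -> int:
--     cs = [2 if k == 0 else (2 * (k + 1) // 3 if k % 3 == 2 else 1) for k in range(n)]
--     # evaluate the continued fraction from the innermost coefficient outward,
--     # as an unreduced (numerator, denominator) pair
--     p, q = 1, 0
--     for a in reversed(cs):
--         p, q = a * p + q, p
--     h = p if cs else 0
--     return sum(int(d) for d in str(h))
-- ===== Notes on version B (the rewrite author's own statement) =====
-- stated objective: alternative
-- what changed: B builds the coefficient list once and evaluates the continued fraction from the innermost coefficient outward as an unreduced numerator/denominator pair (a backward pass over the list), instead of A's forward three-term numerator recurrence computed coefficient-by-coefficient.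
import Mathlib
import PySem

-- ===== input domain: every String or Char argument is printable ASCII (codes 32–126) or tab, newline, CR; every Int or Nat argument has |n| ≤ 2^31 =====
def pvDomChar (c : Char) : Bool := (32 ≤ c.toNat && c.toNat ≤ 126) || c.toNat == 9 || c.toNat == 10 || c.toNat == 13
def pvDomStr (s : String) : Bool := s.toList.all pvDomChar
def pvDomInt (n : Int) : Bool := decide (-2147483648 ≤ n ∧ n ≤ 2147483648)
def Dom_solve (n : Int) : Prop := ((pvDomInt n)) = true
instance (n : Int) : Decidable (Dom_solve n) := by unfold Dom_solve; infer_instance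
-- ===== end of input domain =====

-- B evaluates the continued fraction recursively from the innermost coefficient outward as an
-- unreduced numerator/denominator pair, instead of A's forward three-term numerator recurrence loop.

-- shared helper: sum(int(d) for d in str(h)) — both Pythons contain this exact expression;
-- exact on the digits produced here (the numerator is never negative, so every char parses)
def pyDigitSum (h : Int) : Int :=
  ((PySem.Int.toStr h).toList.map (fun c => ((PySem.Int.ofStr? (String.ofList [c])).getD 0))).sum

-- ===== PORT A =====
def solve (n : Int) : Int :=
  let s := (PySem.List.pyRange 0 n 1).foldl
    (fun (st : Int × Int × Int) k =>
      let a : Int := if k = 0 then 2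
        else (if PySem.Int.mod k 3 = 2 then PySem.Int.floordiv (2 * (k + 1)) 3 else 1)
      let c := a * st.2.1 + st.1
      (st.2.1, c, c)) (0, 1, 0)
  pyDigitSum s.2.2

-- ===== PORT B =====
-- a_0 = 2; a_k = 2*(k+1)//3 if k % 3 == 2 else 1
def coeffB (k : Int) : Int :=
  if k = 0 then 2
  else (if PySem.Int.mod k 3 = 2 then PySem.Int.floordiv (2 * (k + 1)) 3 else 1)

def solve_alt (n : Int) : Int :=
  let cs := (PySem.List.pyRange 0 n 1).map coeffB
  -- loop over reversed(cs): innermost-outward, unreduced (numerator, denominator) pair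
  let pq := cs.reverse.foldl (fun (pq : Int × Int) a => (a * pq.1 + pq.2, pq.1)) (1, 0)
  let h : Int := if cs.isEmpty then 0 else pq.1
  pyDigitSum h

-- ===== PRECONDITION & SPEC =====
def Spec_solve (n : Int) (out : Int) : Prop := out = solve_alt n
instance (n : Int) (out : Int) : Decidable (Spec_solve n out) := by unfold Spec_solve; infer_instance

-- ===== CLAIM (what is proved, stated in full; the proofs are below) =====
def Claim_equal_solve : Prop := ∀ (n : Int), Dom_solve n → Spec_solve n (solve n)

-- ===== LEMMAS AND PROOFS =====

-- 2x2 integer matrices: the continued-fraction convergent machine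
structure Mat where
  a : Int
  b : Int
  c : Int
  d : Int
deriving DecidableEq, Repr

def mmul (X Y : Mat) : Mat :=
  ⟨X.a * Y.a + X.b * Y.c, X.a * Y.b + X.b * Y.d,
   X.c * Y.a + X.d * Y.c, X.c * Y.b + X.d * Y.d⟩

def mI : Mat := ⟨1, 0, 0, 1⟩
def mC (x : Int) : Mat := ⟨x, 1, 1, 0⟩

def P (as : List Int) : Mat := as.foldr (fun x M => mmul (mC x) M) mI

theorem mmul_assoc (X Y Z : Mat) : mmul (mmul X Y) Z = mmul X (mmul Y Z) := by
  cases X; cases Y; cases Z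
  simp only [mmul, Mat.mk.injEq]
  refine ⟨by ring, by ring, by ring, by ring⟩

theorem mI_mul (M : Mat) : mmul mI M = M := by
  cases M; simp [mmul, mI]

theorem mul_mI (M : Mat) : mmul M mI = M := by
  cases M; simp [mmul, mI]

theorem foldr_mul (as : List Int) (M : Mat) :
    as.foldr (fun x N => mmul (mC x) N) M = mmul (P as) M := by
  induction as with
  | nil => simp [P, mI_mul]
  | cons x as ih =>
      simp only [List.foldr_cons, ih, P]
      rw [← mmul_assoc]

theorem P_append_single (bs : List Int) (x : Int) :
    P (bs ++ [x]) = mmul (P bs) (mC x) := by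
  simp only [P, List.foldr_append, List.foldr_cons, List.foldr_nil]
  rw [mul_mI, ← P, foldr_mul]

-- forward numerator recurrence = first row of P
def stepF (p : Int × Int) (x : Int) : Int × Int := (p.2, x * p.2 + p.1)

theorem fwd_eq_P (as : List Int) :
    as.foldl stepF (0, 1) = ((P as).b, (P as).a) := by
  induction as using List.reverseRecOn with
  | nil => simp [P, mI]
  | append_singleton bs x ih =>
      rw [List.foldl_append, ih, P_append_single]
      simp [stepF, mmul, mC]
      ring

-- backward (innermost-outward) evaluation = first column of P
theorem bwd_eq_P (as : List Int) :
    as.reverse.foldl (fun (pq : Int × Int) a => (a * pq.1 + pq.2, pq.1)) (1, 0)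
      = ((P as).a, (P as).c) := by
  rw [List.foldl_reverse]
  induction as with
  | nil => simp [P, mI]
  | cons x as ih =>
      have hP : P (x :: as) = mmul (mC x) (P as) := rfl
      simp [ih, hP, mmul, mC]

-- A's triple-state loop tracks (h_{k-2}, h_{k-1}, current_h): the pair part is stepF,
-- and current_h equals h_{k-1} once the list is nonempty
theorem tri_fold (as : List Int) (x y z : Int) :
    as.foldl (fun (st : Int × Int × Int) a =>
        (st.2.1, a * st.2.1 + st.1, a * st.2.1 + st.1)) (x, y, z)
      = ((as.foldl stepF (x, y)).1, (as.foldl stepF (x, y)).2,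
         if as = [] then z else (as.foldl stepF (x, y)).2) := by
  induction as generalizing x y z with
  | nil => simp
  | cons a as ih =>
      simp only [List.foldl_cons, ih, stepF]
      cases as <;> simp [stepF]

theorem core (n : Int) :
    solve n = solve_alt n := by
  simp only [solve, solve_alt]
  have h1 : (fun (st : Int × Int × Int) (k : Int) =>
      ((st.2.1 : Int),
       (if k = 0 then (2:Int) else if PySem.Int.mod k 3 = 2 then PySem.Int.floordiv (2*(k+1)) 3 else 1) * st.2.1 + st.1,
       (if k = 0 then (2:Int) else if PySem.Int.mod k 3 = 2 then PySem.Int.floordiv (2*(k+1)) 3 else 1) * st.2.1 + st.1))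
    = (fun (st : Int × Int × Int) k =>
       (st.2.1, coeffB k * st.2.1 + st.1, coeffB k * st.2.1 + st.1)) := by
    funext st k; simp [coeffB]
  have h2 : ∀ (l : List Int) (i : Int × Int × Int),
      l.foldl (fun (st : Int × Int × Int) k =>
        (st.2.1, coeffB k * st.2.1 + st.1, coeffB k * st.2.1 + st.1)) i
      = (l.map coeffB).foldl (fun (st : Int × Int × Int) a =>
        (st.2.1, a * st.2.1 + st.1, a * st.2.1 + st.1)) i := by
    intro l
    induction l with
    | nil => intro i; rfl
    | cons x xs ih => intro i; simp only [List.foldl_cons, List.map_cons, ih]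
  rw [h1, h2, tri_fold, fwd_eq_P, bwd_eq_P]
  rcases h : (PySem.List.pyRange 0 n 1).map coeffB with _ | ⟨a, rest⟩ <;> simp

-- ===== VERDICT (by name: the statement is the Claim_ definition above) =====
theorem solve_spec : Claim_equal_solve := by
  intro n _
  unfold Spec_solve
  exact core n
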